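-- pv_equiv track=rewrite | github.com/kotharipeddirajulu/Cipherware | decode1.py | Porta_decode
-- ===== SOURCE A (Python) =====
-- def Porta_key_generator(key):
--     alphabet = {
--         "A": [["A", "B", "C", "D", "E", "F", "G", "H", "I", "J", "K", "L", "M"],
--               ["N", "O", "P", "Q", "R", "S", "T", "U", "V", "W", "X", "Y", "Z"]],
--         "B": [["A", "B", "C", "D", "E", "F", "G", "H", "I", "J", "K", "L", "M"],
--               ["N", "O", "P", "Q", "R", "S", "T", "U", "V", "W", "X", "Y", "Z"]],
--         "C": [["A", "B", "C", "D", "E", "F", "G", "H", "I", "J", "K", "L", "M"],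
--               ["Z", "N", "O", "P", "Q", "R", "S", "T", "U", "V", "W", "X", "Y"]],
--         "D": [["A", "B", "C", "D", "E", "F", "G", "H", "I", "J", "K", "L", "M"],
--               ["Z", "N", "O", "P", "Q", "R", "S", "T", "U", "V", "W", "X", "Y"]],
--         "E": [["A", "B", "C", "D", "E", "F", "G", "H", "I", "J", "K", "L", "M"],
--               ["Y", "Z", "N", "O", "P", "Q", "R", "S", "T", "U", "V", "W", "X"]],
--         "F": [["A", "B", "C", "D", "E", "F", "G", "H", "I", "J", "K", "L", "M"],
--               ["Y", "Z", "N", "O", "P", "Q", "R", "S", "T", "U", "V", "W", "X"]],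
--         "G": [["A", "B", "C", "D", "E", "F", "G", "H", "I", "J", "K", "L", "M"],
--               ["X", "Y", "Z", "N", "O", "P", "Q", "R", "S", "T", "U", "V", "W"]],
--         "H": [["A", "B", "C", "D", "E", "F", "G", "H", "I", "J", "K", "L", "M"],
--               ["X", "Y", "Z", "N", "O", "P", "Q", "R", "S", "T", "U", "V", "W"]],
--         "I": [["A", "B", "C", "D", "E", "F", "G", "H", "I", "J", "K", "L", "M"],
--               ["W", "X", "Y", "Z", "N", "O", "P", "Q", "R", "S", "T", "U", "V"]],
--         "J": [["A", "B", "C", "D", "E", "F", "G", "H", "I", "J", "K", "L", "M"],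
--               ["W", "X", "Y", "Z", "N", "O", "P", "Q", "R", "S", "T", "U", "V"]],
--         "K": [["A", "B", "C", "D", "E", "F", "G", "H", "I", "J", "K", "L", "M"],
--               ["V", "W", "X", "Y", "Z", "N", "O", "P", "Q", "R", "S", "T", "U"]],
--         "L": [["A", "B", "C", "D", "E", "F", "G", "H", "I", "J", "K", "L", "M"],
--               ["V", "W", "X", "Y", "Z", "N", "O", "P", "Q", "R", "S", "T", "U"]],
--         "M": [["A", "B", "C", "D", "E", "F", "G", "H", "I", "J", "K", "L", "M"],
--               ["U", "V", "W", "X", "Y", "Z", "N", "O", "P", "Q", "R", "S", "T"]],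
--         "N": [["A", "B", "C", "D", "E", "F", "G", "H", "I", "J", "K", "L", "M"],
--               ["U", "V", "W", "X", "Y", "Z", "N", "O", "P", "Q", "R", "S", "T"]],
--         "O": [["A", "B", "C", "D", "E", "F", "G", "H", "I", "J", "K", "L", "M"],
--               ["T", "U", "V", "W", "X", "Y", "Z", "N", "O", "P", "Q", "R", "S"]],
--         "P": [["A", "B", "C", "D", "E", "F", "G", "H", "I", "J", "K", "L", "M"],
--               ["T", "U", "V", "W", "X", "Y", "Z", "N", "O", "P", "Q", "R", "S"]],
--         "Q": [["A", "B", "C", "D", "E", "F", "G", "H", "I", "J", "K", "L", "M"],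
--               ["S", "T", "U", "V", "W", "X", "Y", "Z", "N", "O", "P", "Q", "R"]],
--         "R": [["A", "B", "C", "D", "E", "F", "G", "H", "I", "J", "K", "L", "M"],
--               ["S", "T", "U", "V", "W", "X", "Y", "Z", "N", "O", "P", "Q", "R"]],
--         "S": [["A", "B", "C", "D", "E", "F", "G", "H", "I", "J", "K", "L", "M"],
--               ["R", "S", "T", "U", "V", "W", "X", "Y", "Z", "N", "O", "P", "Q"]],
--         "T": [["A", "B", "C", "D", "E", "F", "G", "H", "I", "J", "K", "L", "M"],
--               ["R", "S", "T", "U", "V", "W", "X", "Y", "Z", "N", "O", "P", "Q"]],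
--         "U": [["A", "B", "C", "D", "E", "F", "G", "H", "I", "J", "K", "L", "M"],
--               ["Q", "R", "S", "T", "U", "V", "W", "X", "Y", "Z", "N", "O", "P"]],
--         "V": [["A", "B", "C", "D", "E", "F", "G", "H", "I", "J", "K", "L", "M"],
--               ["Q", "R", "S", "T", "U", "V", "W", "X", "Y", "Z", "N", "O", "P"]],
--         "W": [["A", "B", "C", "D", "E", "F", "G", "H", "I", "J", "K", "L", "M"],
--               ["P", "Q", "R", "S", "T", "U", "V", "W", "X", "Y", "Z", "N", "O"]],
--         "X": [["A", "B", "C", "D", "E", "F", "G", "H", "I", "J", "K", "L", "M"],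
--               ["P", "Q", "R", "S", "T", "U", "V", "W", "X", "Y", "Z", "N", "O"]],
--         "Y": [["A", "B", "C", "D", "E", "F", "G", "H", "I", "J", "K", "L", "M"],
--               ["O", "P", "Q", "R", "S", "T", "U", "V", "W", "X", "Y", "Z", "N"]],
--         "Z": [["A", "B", "C", "D", "E", "F", "G", "H", "I", "J", "K", "L", "M"],
--               ["O", "P", "Q", "R", "S", "T", "U", "V", "W", "X", "Y", "Z", "N"]]}
--
--     tab = []
--     for alpha in key.upper():
--         tab.append(alphabet[alpha])
--     return tab
--
-- def Porta_getPositions(tab,alpha):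
--     row = -1
--     if alpha in tab[0]:
--         row=0
--     elif alpha in tab[1]:
--         row=1
--
--     if row != -1:
--         return(row,tab[row].index(alpha))
--     else:
--         return(None,None)
--
-- def Porta_getOpponent(tab,alpha):
--     row,col = Porta_getPositions(tab,alpha.upper())
--     if row ==1:
--         return tab[0][col]
--     elif row ==0:
--         return tab[1][col]
--     else:
--         return alpha
--
-- def Porta_decode(text, key):
--     decrypted = ''
--     count = 0
--     tab = Porta_key_generator(key)
--     for alpha in text.upper():
--         decrypted += Porta_getOpponent(tab[count],alpha)
--         count = (count + 1)%len(tab)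
--     return decrypted
-- ===== SOURCE B (Python) =====
-- def Porta_decode(text, key):
--     # Arithmetic Porta decode: no alphabet table, no helpers.
--     K = key.upper()
--     out = []
--     i = 0
--     for ch in text.upper():
--         if 'A' <= ch <= 'Z':
--             g = (ord(K[i % len(K)]) - 65) // 2
--             p = ord(ch) - 65
--             if p < 13:
--                 out.append(chr(65 + 13 + (p - g) % 13))
--             else:
--                 out.append(chr(65 + (p - 13 + g) % 13))
--         else:
--             out.append(ch)
--         i += 1
--     return ''.join(out)
-- ===== Notes on version B (the rewrite author's own statement) =====
-- stated objective: simpler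
-- what changed: Replaced the 26-entry alphabet table and the getPositions/getOpponent row-scanning helpers with direct modular arithmetic on character codes (one formula per half of the alphabet), accumulating output in a list joined once.
import Mathlib
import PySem

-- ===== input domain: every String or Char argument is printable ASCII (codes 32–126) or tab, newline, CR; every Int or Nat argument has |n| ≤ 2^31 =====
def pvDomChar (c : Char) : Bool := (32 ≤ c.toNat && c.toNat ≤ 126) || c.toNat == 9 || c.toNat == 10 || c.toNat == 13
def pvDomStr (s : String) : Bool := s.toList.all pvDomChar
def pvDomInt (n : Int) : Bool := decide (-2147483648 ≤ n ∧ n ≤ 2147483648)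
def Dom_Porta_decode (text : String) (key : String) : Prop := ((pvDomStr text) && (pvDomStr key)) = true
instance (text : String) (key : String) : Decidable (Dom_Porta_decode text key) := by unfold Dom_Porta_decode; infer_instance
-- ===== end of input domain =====

-- B replaces A's 26-entry table and row-scanning helpers by direct modular arithmetic on character codes (simpler).

-- ===== PORT A =====
def pvRow0 : List Char := "ABCDEFGHIJKLM".toList

-- the `alphabet` dict of Porta_key_generator, verbatim
def portaAlphabet : PySem.Dict Char (List Char × List Char) :=
  PySem.Dict.ofList [
    ('A', (pvRow0, "NOPQRSTUVWXYZ".toList)), ('B', (pvRow0, "NOPQRSTUVWXYZ".toList)),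
    ('C', (pvRow0, "ZNOPQRSTUVWXY".toList)), ('D', (pvRow0, "ZNOPQRSTUVWXY".toList)),
    ('E', (pvRow0, "YZNOPQRSTUVWX".toList)), ('F', (pvRow0, "YZNOPQRSTUVWX".toList)),
    ('G', (pvRow0, "XYZNOPQRSTUVW".toList)), ('H', (pvRow0, "XYZNOPQRSTUVW".toList)),
    ('I', (pvRow0, "WXYZNOPQRSTUV".toList)), ('J', (pvRow0, "WXYZNOPQRSTUV".toList)),
    ('K', (pvRow0, "VWXYZNOPQRSTU".toList)), ('L', (pvRow0, "VWXYZNOPQRSTU".toList)),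
    ('M', (pvRow0, "UVWXYZNOPQRST".toList)), ('N', (pvRow0, "UVWXYZNOPQRST".toList)),
    ('O', (pvRow0, "TUVWXYZNOPQRS".toList)), ('P', (pvRow0, "TUVWXYZNOPQRS".toList)),
    ('Q', (pvRow0, "STUVWXYZNOPQR".toList)), ('R', (pvRow0, "STUVWXYZNOPQR".toList)),
    ('S', (pvRow0, "RSTUVWXYZNOPQ".toList)), ('T', (pvRow0, "RSTUVWXYZNOPQ".toList)),
    ('U', (pvRow0, "QRSTUVWXYZNOP".toList)), ('V', (pvRow0, "QRSTUVWXYZNOP".toList)),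
    ('W', (pvRow0, "PQRSTUVWXYZNO".toList)), ('X', (pvRow0, "PQRSTUVWXYZNO".toList)),
    ('Y', (pvRow0, "OPQRSTUVWXYZN".toList)), ('Z', (pvRow0, "OPQRSTUVWXYZN".toList))]

-- `alphabet[alpha]` raises KeyError when alpha is missing: modelled by the Option state (none = KeyError; excluded by Pre_)
def Porta_key_generator (key : String) : Option (List (List Char × List Char)) :=
  (PySem.Chars.upper key.toList).foldl
    (fun acc alpha =>
      match acc, PySem.Dict.get? portaAlphabet alpha with
      | some tab, some e => some (tab ++ [e])
      | _, _ => none)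
    (some [])

def Porta_getPositions (tab : List Char × List Char) (alpha : Char) : Option Nat × Option Nat :=
  if alpha ∈ tab.1 then (some 0, PySem.List.index? tab.1 alpha)
  else if alpha ∈ tab.2 then (some 1, PySem.List.index? tab.2 alpha)
  else (none, none)

def Porta_getOpponent (tab : List Char × List Char) (alpha : Char) : Char :=
  match Porta_getPositions tab (PySem.Chars.upperChar alpha) with
  | (some 1, some col) => (tab.1[col]?).getD alpha   -- col comes from index? of a found element, so the default is never hit
  | (some 0, some col) => (tab.2[col]?).getD alpha
  | _ => alpha

def Porta_decode (text : String) (key : String) : String :=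
  match Porta_key_generator key with
  | none => ""   -- KeyError in Porta_key_generator (excluded by Pre_)
  | some tab =>
    let st := (PySem.Chars.upper text.toList).foldl
      (fun (st : List Char × Nat) alpha =>
        match PySem.List.pyGet? tab (st.2 : Int) with
        | none => st   -- IndexError tab[count] on an empty key (excluded by Pre_)
        | some t => (st.1 ++ [Porta_getOpponent t alpha], (st.2 + 1) % tab.length))
      ([], 0)
    String.ofList st.1

-- ===== PORT B =====
def Porta_decode_alt (text : String) (key : String) : String :=
  let K := PySem.Chars.upper key.toList
  let st := (PySem.Chars.upper text.toList).foldl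
    (fun (st : List Char × Nat) ch =>
      let cell :=
        if 'A' ≤ ch ∧ ch ≤ 'Z' then
          match PySem.List.pyGet? K ((st.2 % K.length : Nat) : Int) with
          | none => ch   -- ZeroDivisionError i % len(K) on an empty key (excluded by Pre_)
          | some k =>
            let g : Int := PySem.Int.floordiv ((k.toNat : Int) - 65) 2
            let p : Int := (ch.toNat : Int) - 65
            if p < 13 then Char.ofNat (65 + 13 + PySem.Int.mod (p - g) 13).toNat
            else Char.ofNat (65 + PySem.Int.mod (p - 13 + g) 13).toNat
        else ch
      (st.1 ++ [cell], st.2 + 1))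
    ([], 0)
  String.ofList st.1

-- ===== PRECONDITION & SPEC =====
-- Pre_ excludes exactly the inputs on which A raises: a key with a non-ASCII-letter character
-- (KeyError in Porta_key_generator) and an empty key with non-empty text (IndexError at tab[count]).
def Pre_Porta_decode (text : String) (key : String) : Prop :=
  (key.toList.all fun c =>
    (decide ('A' ≤ c) && decide (c ≤ 'Z')) || (decide ('a' ≤ c) && decide (c ≤ 'z'))) = true
  ∧ (text.toList ≠ [] → key.toList ≠ [])
instance (text : String) (key : String) : Decidable (Pre_Porta_decode text key) := by
  unfold Pre_Porta_decode; infer_instance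

def pvWitness_Porta_decode : String × String := ("Hi!", "k")

def Spec_Porta_decode (text : String) (key : String) (out : String) : Prop := out = Porta_decode_alt text key
instance (text : String) (key : String) (out : String) : Decidable (Spec_Porta_decode text key out) := by unfold Spec_Porta_decode; infer_instance

-- ===== CLAIM (what is proved, stated in full; the proofs are below) =====
def Claim_equal_Porta_decode : Prop := ∀ (text : String) (key : String), Dom_Porta_decode text key → Pre_Porta_decode text key → Spec_Porta_decode text key (Porta_decode text key)

-- ===== LEMMAS AND PROOFS =====

-- the 26 uppercase letters and the printable-ASCII domain, as explicit lists
def pvUpper26 : List Char := (List.range' 65 26).map Char.ofNat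
def pvAsciiList : List Char := (List.range' 32 95 ++ [9, 10, 13]).map Char.ofNat

-- the table entry A builds for an (uppercase-letter) key character
def pvEntry (k : Char) : List Char × List Char :=
  (PySem.Dict.get? portaAlphabet k).getD ([], [])

-- B's per-character formula for a letter ch under key letter k (the `some` branch of B's match)
def pvBCell (k : Char) (ch : Char) : Char :=
  let g : Int := PySem.Int.floordiv ((k.toNat : Int) - 65) 2
  let p : Int := (ch.toNat : Int) - 65
  if p < 13 then Char.ofNat (65 + 13 + PySem.Int.mod (p - g) 13).toNat
  else Char.ofNat (65 + PySem.Int.mod (p - 13 + g) 13).toNat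

lemma pv_mem_ascii {c : Char} (h : pvDomChar c = true) : c ∈ pvAsciiList := by
  refine List.mem_map.mpr ⟨c.toNat, ?_, Char.ofNat_toNat c⟩
  simp only [pvDomChar, Bool.or_eq_true, Bool.and_eq_true, decide_eq_true_eq, beq_iff_eq] at h
  simp only [List.mem_append, List.mem_range'_1, List.mem_cons, List.not_mem_nil]
  omega

lemma pv_mem_upper26 {c : Char} (h1 : 'A' ≤ c) (h2 : c ≤ 'Z') : c ∈ pvUpper26 := by
  have hb : 65 ≤ c.toNat ∧ c.toNat ≤ 90 := by
    constructor <;> [exact h1; exact h2]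
  refine List.mem_map.mpr ⟨c.toNat, ?_, Char.ofNat_toNat c⟩
  simp only [List.mem_range'_1]
  omega

lemma pv_upper_of_letter : ∀ c ∈ pvAsciiList,
    (('A' ≤ c ∧ c ≤ 'Z') ∨ ('a' ≤ c ∧ c ≤ 'z')) → PySem.Chars.upperChar c ∈ pvUpper26 := by
  have h : (pvAsciiList.all fun c =>
      !(decide ('A' ≤ c ∧ c ≤ 'Z') || decide ('a' ≤ c ∧ c ≤ 'z')) ||
        decide (PySem.Chars.upperChar c ∈ pvUpper26)) = true := by rfl
  intro c hc hl
  have := List.all_eq_true.mp h c hc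
  simp only [Bool.or_eq_true, Bool.not_eq_true', Bool.or_eq_false_iff,
    decide_eq_false_iff_not, decide_eq_true_eq] at this
  tauto

lemma pv_upper_dom : ∀ c ∈ pvAsciiList,
    PySem.Chars.upperChar c ∈ pvAsciiList ∧
      PySem.Chars.upperChar (PySem.Chars.upperChar c) = PySem.Chars.upperChar c := by
  have h : (pvAsciiList.all fun c =>
      decide (PySem.Chars.upperChar c ∈ pvAsciiList) &&
        (PySem.Chars.upperChar (PySem.Chars.upperChar c) == PySem.Chars.upperChar c)) = true := by rfl
  intro c hc
  have := List.all_eq_true.mp h c hc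
  simp only [Bool.and_eq_true, decide_eq_true_eq, beq_iff_eq] at this
  exact this

lemma pv_get?_entry : ∀ k ∈ pvUpper26,
    PySem.Dict.get? portaAlphabet k = some (pvEntry k) := by
  have h : (pvUpper26.all fun k =>
      PySem.Dict.get? portaAlphabet k == some (pvEntry k)) = true := by rfl
  intro k hk
  exact eq_of_beq (List.all_eq_true.mp h k hk)

lemma pv_core_letter : ∀ k ∈ pvUpper26, ∀ ch ∈ pvUpper26,
    Porta_getOpponent (pvEntry k) ch = pvBCell k ch := by
  have h : (pvUpper26.all fun k => pvUpper26.all fun ch =>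
      Porta_getOpponent (pvEntry k) ch == pvBCell k ch) = true := by rfl
  intro k hk ch hch
  exact eq_of_beq (List.all_eq_true.mp (List.all_eq_true.mp h k hk) ch hch)

lemma pv_core_other : ∀ ch ∈ pvAsciiList, PySem.Chars.upperChar ch = ch →
    ¬('A' ≤ ch ∧ ch ≤ 'Z') → ∀ k ∈ pvUpper26, Porta_getOpponent (pvEntry k) ch = ch := by
  have h : (pvAsciiList.all fun ch =>
      !(PySem.Chars.upperChar ch == ch) || decide ('A' ≤ ch ∧ ch ≤ 'Z') ||
        pvUpper26.all (fun k => Porta_getOpponent (pvEntry k) ch == ch)) = true := by rfl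
  intro ch hch hfix hnl k hk
  have := List.all_eq_true.mp h ch hch
  simp only [Bool.or_eq_true, Bool.not_eq_true', beq_eq_false_iff_ne, ne_eq,
    decide_eq_true_eq, List.all_eq_true] at this
  rcases this with ((hne | hl) | hall)
  · exact absurd hfix hne
  · exact absurd hl hnl
  · exact eq_of_beq (hall k hk)

-- Porta_key_generator's loop succeeds on uppercase-letter characters and appends the mapped entries
lemma pv_keygen_fold (l : List Char) (hl : ∀ c ∈ l, c ∈ pvUpper26) :
    ∀ acc : List (List Char × List Char),
      l.foldl
        (fun acc alpha =>
          match acc, PySem.Dict.get? portaAlphabet alpha with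
          | some tab, some e => some (tab ++ [e])
          | _, _ => none)
        (some acc) = some (acc ++ l.map pvEntry) := by
  induction l with
  | nil => intro acc; simp
  | cons c l ih =>
    intro acc
    have hc := hl c (by simp)
    simp only [List.foldl_cons, pv_get?_entry c hc]
    rw [ih (fun x hx => hl x (by simp [hx])) (acc ++ [pvEntry c])]
    simp

-- the main loop invariant: A's fold over the entry table equals B's fold, counters kept in step
lemma pv_fold_eq (K' : List Char) (hK : ∀ c ∈ K', c ∈ pvUpper26) (hne : K' ≠ []) :
    ∀ (L : List Char), (∀ c ∈ L, c ∈ pvAsciiList ∧ PySem.Chars.upperChar c = c) →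
    ∀ (acc : List Char) (i : Nat),
      ((L.foldl
        (fun (st : List Char × Nat) alpha =>
          match PySem.List.pyGet? (K'.map pvEntry) (st.2 : Int) with
          | none => st
          | some t => (st.1 ++ [Porta_getOpponent t alpha], (st.2 + 1) % (K'.map pvEntry).length))
        (acc, i % K'.length)).1 : List Char) =
      ((L.foldl
        (fun (st : List Char × Nat) ch =>
          let cell :=
            if 'A' ≤ ch ∧ ch ≤ 'Z' then
              match PySem.List.pyGet? K' ((st.2 % K'.length : Nat) : Int) with
              | none => ch
              | some k => pvBCell k ch
            else ch
          (st.1 ++ [cell], st.2 + 1))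
        (acc, i)).1 : List Char) := by
  have hn : 0 < K'.length := List.length_pos_iff.mpr hne
  intro L
  induction L with
  | nil => intro _ acc i; rfl
  | cons ch L ih =>
    intro hL acc i
    obtain ⟨hdom, hfix⟩ := hL ch (by simp)
    have hmod : i % K'.length < K'.length := Nat.mod_lt _ hn
    set k := K'[i % K'.length]'hmod with hkdef
    have hk : k ∈ pvUpper26 := hK k (List.getElem_mem hmod)
    have hgetA : PySem.List.pyGet? (K'.map pvEntry) ((i % K'.length : Nat) : Int)
        = some (pvEntry k) := by
      rw [PySem.List.pyGet?_natCast]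
      rw [List.getElem?_eq_getElem (by simpa using hmod)]
      simp [hkdef]
    have hgetB : PySem.List.pyGet? K' ((i % K'.length : Nat) : Int) = some k := by
      rw [PySem.List.pyGet?_natCast]
      rw [List.getElem?_eq_getElem hmod]
    have hcell : Porta_getOpponent (pvEntry k) ch
        = (if 'A' ≤ ch ∧ ch ≤ 'Z' then
            match PySem.List.pyGet? K' ((i % K'.length : Nat) : Int) with
            | none => ch
            | some k => pvBCell k ch
          else ch) := by
      by_cases hch : 'A' ≤ ch ∧ ch ≤ 'Z'
      · rw [if_pos hch, hgetB]
        exact pv_core_letter k hk ch (pv_mem_upper26 hch.1 hch.2)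
      · rw [if_neg hch]
        exact pv_core_other ch hdom hfix hch k hk
    simp only [List.foldl_cons, hgetA]
    rw [hcell]
    have hcnt : (i % K'.length + 1) % (K'.map pvEntry).length = (i + 1) % K'.length := by
      simp [Nat.mod_add_mod]
    rw [hcnt]
    exact ih (fun c hc => hL c (by simp [hc])) _ (i + 1)

-- ===== VERDICT (by name: the statement is the Claim_ definition above) =====
theorem Porta_decode_spec : Claim_equal_Porta_decode := by
  intro text key hdom hpre
  obtain ⟨hkey, hne⟩ := hpre
  have hdom' : pvDomStr text = true ∧ pvDomStr key = true := by
    simpa [Dom_Porta_decode, Bool.and_eq_true] using hdom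
  have hK : ∀ c ∈ PySem.Chars.upper key.toList, c ∈ pvUpper26 := by
    intro c hc
    simp only [PySem.Chars.upper, List.mem_map] at hc
    obtain ⟨c0, hc0, rfl⟩ := hc
    have hd0 : c0 ∈ pvAsciiList :=
      pv_mem_ascii (by simpa using List.all_eq_true.mp hdom'.2 c0 hc0)
    have hl0 := List.all_eq_true.mp hkey c0 hc0
    simp only [Bool.or_eq_true, Bool.and_eq_true, decide_eq_true_eq] at hl0
    exact pv_upper_of_letter c0 hd0 hl0
  have hkeygen : Porta_key_generator key
      = some ((PySem.Chars.upper key.toList).map pvEntry) := by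
    unfold Porta_key_generator
    simpa using pv_keygen_fold _ hK []
  show Porta_decode text key = Porta_decode_alt text key
  by_cases htext : text.toList = []
  · simp [Porta_decode, Porta_decode_alt, hkeygen, PySem.Chars.upper, htext]
  · have hkne : key.toList ≠ [] := hne htext
    have hKne : PySem.Chars.upper key.toList ≠ [] := by
      simp only [PySem.Chars.upper, ne_eq, List.map_eq_nil_iff]
      exact hkne
    have hL : ∀ c ∈ PySem.Chars.upper text.toList,
        c ∈ pvAsciiList ∧ PySem.Chars.upperChar c = c := by
      intro c hc
      simp only [PySem.Chars.upper, List.mem_map] at hc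
      obtain ⟨c0, hc0, rfl⟩ := hc
      have hd0 : c0 ∈ pvAsciiList :=
        pv_mem_ascii (by simpa using List.all_eq_true.mp hdom'.1 c0 hc0)
      exact pv_upper_dom c0 hd0
    unfold Porta_decode Porta_decode_alt
    rw [hkeygen]
    simp only []
    congr 1
    have := pv_fold_eq _ hK hKne _ hL [] 0
    rw [Nat.zero_mod] at this
    exact this
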